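-- pv_equiv track=rewrite | github.com/REDDITARUN/arc-react | data_loader.py | pad_grid_and_mask
-- ===== SOURCE A (Python) =====
-- def validate_grid_size(grid: list, pad_size: int) -> None:
--     height = len(grid)
--     width = len(grid[0])
--     if height > pad_size or width > pad_size:
--         raise ValueError(
--             f"Grid shape {(height, width)} exceeds pad_size={pad_size}"
--         )
--
-- def pad_grid_and_mask(grid: list, pad_size: int) -> tuple:
--     validate_grid_size(grid, pad_size)
--
--     padded = []
--     mask = []
--
--     row_index = 0
--     while row_index < pad_size:
--         padded_row = []
--         mask_row = []
--         col_index = 0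
--         while col_index < pad_size:
--             if row_index < len(grid) and col_index < len(grid[0]):
--                 padded_row.append(grid[row_index][col_index])
--                 mask_row.append(1)
--             else:
--                 padded_row.append(0)
--                 mask_row.append(0)
--             col_index += 1
--         padded.append(padded_row)
--         mask.append(mask_row)
--         row_index += 1
--
--     return padded, mask
-- ===== SOURCE B (Python) =====
-- def pad_grid_and_mask(grid: list, pad_size: int) -> tuple:
--     height = len(grid)
--     width = len(grid[0])
--     if height > pad_size or width > pad_size:
--         raise ValueError(
--             f"Grid shape {(height, width)} exceeds pad_size={pad_size}"
--         )
--
--     n_pad_cols = pad_size - width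
--     padded = [row[:width] + [0] * n_pad_cols for row in grid] \
--         + [[0] * pad_size for _ in range(pad_size - height)]
--     mask = [[1] * width + [0] * n_pad_cols for _ in range(height)] \
--         + [[0] * pad_size for _ in range(pad_size - height)]
--     return padded, mask
-- ===== Notes on version B (the rewrite author's own statement) =====
-- stated objective: simpler
-- what changed: Replaces the nested per-cell while loops with a per-conditional append by a rows-plus-zero-segments construction: each real row is its width-prefix plus a zero pad segment, followed by fully zero rows, built with slicing and list repetition.
import Mathlib
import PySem

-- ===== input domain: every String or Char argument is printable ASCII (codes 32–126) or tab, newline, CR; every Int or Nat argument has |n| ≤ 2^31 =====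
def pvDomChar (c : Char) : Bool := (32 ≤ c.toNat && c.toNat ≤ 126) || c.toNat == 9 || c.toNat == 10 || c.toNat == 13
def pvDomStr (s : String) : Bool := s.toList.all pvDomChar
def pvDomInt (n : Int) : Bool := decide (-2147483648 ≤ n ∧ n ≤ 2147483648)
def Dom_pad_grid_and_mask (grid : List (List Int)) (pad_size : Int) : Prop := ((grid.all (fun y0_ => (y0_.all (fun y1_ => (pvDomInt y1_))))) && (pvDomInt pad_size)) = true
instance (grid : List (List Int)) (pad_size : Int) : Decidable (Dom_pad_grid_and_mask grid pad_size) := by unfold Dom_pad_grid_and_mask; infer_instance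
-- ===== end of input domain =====

-- B replaces A's nested per-cell while loops by a rows-plus-zero-segments construction (same cost, simpler).


-- ===== PORT A =====
-- Literal port of A: after validation, two nested while loops over [0, pad_size) append one cell
-- (and one mask bit) at a time.  grid[row_index][col_index] is ported with pyGetD: under
-- Pre_pad_grid_and_mask both indices are in range wherever the branch takes them (ragged rows,
-- on which Python raises IndexError, are excluded by Pre_).
def pad_grid_and_mask (grid : List (List Int)) (pad_size : Int) : List (List Int) × List (List Int) :=
  (PySem.List.pyRange 0 pad_size 1).foldl
    (fun (acc : List (List Int) × List (List Int)) r =>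
      let inner :=
        (PySem.List.pyRange 0 pad_size 1).foldl
          (fun (racc : List Int × List Int) c =>
            if r < (grid.length : Int) ∧ c < ((grid.headD []).length : Int) then
              (racc.1 ++ [PySem.List.pyGetD (PySem.List.pyGetD grid r []) c 0], racc.2 ++ [1])
            else
              (racc.1 ++ [0], racc.2 ++ [0]))
          ([], [])
      (acc.1 ++ [inner.1], acc.2 ++ [inner.2]))
    ([], [])

-- ===== PORT B =====
-- Literal port of B: row[:width] + [0]*(pad_size-width) per real row, then all-zero rows;
-- the mask is the same shape with 1s over the real cells.
def pad_grid_and_mask_alt (grid : List (List Int)) (pad_size : Int) : List (List Int) × List (List Int) :=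
  let width := (grid.headD []).length
  let nPadCols := (pad_size - (width : Int)).toNat
  let zeroRows := List.replicate (pad_size - (grid.length : Int)).toNat
                    (List.replicate pad_size.toNat (0 : Int))
  (grid.map (fun row => row.take width ++ List.replicate nPadCols 0) ++ zeroRows,
   List.replicate grid.length (List.replicate width (1 : Int) ++ List.replicate nPadCols 0) ++ zeroRows)

-- ===== PRECONDITION & SPEC =====
-- Pre_ excludes exactly the inputs where A raises: the empty grid (IndexError on grid[0]),
-- grids exceeding pad_size (ValueError), and ragged grids with a row shorter than grid[0]
-- (IndexError inside the loop).
def Pre_pad_grid_and_mask (grid : List (List Int)) (pad_size : Int) : Prop :=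
  grid ≠ [] ∧ (grid.length : Int) ≤ pad_size ∧ ((grid.headD []).length : Int) ≤ pad_size ∧
    ∀ row ∈ grid, (grid.headD []).length ≤ row.length
instance (grid : List (List Int)) (pad_size : Int) : Decidable (Pre_pad_grid_and_mask grid pad_size) := by unfold Pre_pad_grid_and_mask; infer_instance

def pvWitness_pad_grid_and_mask : List (List Int) × Int := ([[1, 2], [3, 4]], 3)

def Spec_pad_grid_and_mask (grid : List (List Int)) (pad_size : Int) (out : List (List Int) × List (List Int)) : Prop := out = pad_grid_and_mask_alt grid pad_size
instance (grid : List (List Int)) (pad_size : Int) (out : List (List Int) × List (List Int)) : Decidable (Spec_pad_grid_and_mask grid pad_size out) := by unfold Spec_pad_grid_and_mask; infer_instance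

-- ===== CLAIM (what is proved, stated in full; the proofs are below) =====
def Claim_equal_pad_grid_and_mask : Prop := ∀ (grid : List (List Int)) (pad_size : Int), Dom_pad_grid_and_mask grid pad_size → Pre_pad_grid_and_mask grid pad_size → Spec_pad_grid_and_mask grid pad_size (pad_grid_and_mask grid pad_size)

-- ===== LEMMAS AND PROOFS =====

-- A fold that appends one element to each component of a pair is the pair of maps.
theorem pairFoldSingle {α β : Type} (l : List α) (f g : α → β) (a b : List β) :
    l.foldl (fun acc x => (acc.1 ++ [f x], acc.2 ++ [g x])) (a, b) = (a ++ l.map f, b ++ l.map g) := by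
  induction l generalizing a b with
  | nil => simp
  | cons x xs ih => simp [List.foldl_cons, ih]

-- One real row of A's inner loop, padded form.
theorem innerRow_eq {row : List Int} {w N : Nat} (hw : w ≤ row.length) (hN : w ≤ N) :
    (List.range N).map (fun (c : Nat) => if (c : Int) < (w : Int) then PySem.List.pyGetD row (c : Int) 0 else 0)
      = row.take w ++ List.replicate (N - w) 0 := by
  apply List.ext_getElem
  · simp [Nat.min_eq_left hw]; omega
  · intro j hj hj2
    simp only [List.getElem_map, List.getElem_range]
    by_cases h : j < w
    · rw [if_pos (by exact_mod_cast h)]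
      rw [List.getElem_append_left (by simp [Nat.min_eq_left hw]; omega)]
      simp [PySem.List.pyGetD_natCast, List.getElem_take, List.getElem?_eq_getElem (by omega : j < row.length)]
    · rw [if_neg (by exact_mod_cast h)]
      rw [List.getElem_append_right (by simp [Nat.min_eq_left hw]; omega)]
      simp

-- A fold whose step branches on a predicate and appends one element to each pair component.
theorem pairFoldIf {α β : Type} (l : List α) (P : α → Prop) [DecidablePred P]
    (f g f' g' : α → β) (a b : List β) :
    l.foldl (fun acc x => if P x then (acc.1 ++ [f x], acc.2 ++ [g x])
                          else (acc.1 ++ [f' x], acc.2 ++ [g' x])) (a, b)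
      = (a ++ l.map (fun x => if P x then f x else f' x),
         b ++ l.map (fun x => if P x then g x else g' x)) := by
  induction l generalizing a b with
  | nil => simp
  | cons x xs ih => by_cases h : P x <;> simp [h, ih]

-- Port A as a double map over List.range.
theorem portA_eq (grid : List (List Int)) (N : Nat) :
    pad_grid_and_mask grid (N : Int) =
      ((List.range N).map (fun (r : Nat) => (List.range N).map (fun (c : Nat) =>
          if (r : Int) < (grid.length : Int) ∧ (c : Int) < ((grid.headD []).length : Int)
          then PySem.List.pyGetD (PySem.List.pyGetD grid (r : Int) []) (c : Int) 0 else 0)),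
       (List.range N).map (fun (r : Nat) => (List.range N).map (fun (c : Nat) =>
          if (r : Int) < (grid.length : Int) ∧ (c : Int) < ((grid.headD []).length : Int)
          then (1 : Int) else 0))) := by
  have hr : PySem.List.pyRange 0 (N : Int) 1 = (List.range N).map Int.ofNat := by
    rw [PySem.List.pyRange_one]
    simp [Int.ofNat_eq_natCast]
  unfold pad_grid_and_mask
  simp only [hr, pairFoldIf, List.nil_append, pairFoldSingle, List.map_map, Function.comp_def,
    Int.ofNat_eq_natCast]

-- The mask row.
theorem maskRow_eq {w N : Nat} (hN : w ≤ N) :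
    (List.range N).map (fun (c : Nat) => if (c : Int) < (w : Int) then (1 : Int) else 0)
      = List.replicate w 1 ++ List.replicate (N - w) 0 := by
  apply List.ext_getElem
  · simp; omega
  · intro j hj hj2
    simp only [List.getElem_map, List.getElem_range]
    by_cases h : j < w
    · rw [if_pos (by exact_mod_cast h), List.getElem_append_left (by simpa using h)]
      simp
    · rw [if_neg (by exact_mod_cast h), List.getElem_append_right (by simpa using h)]
      simp

-- ===== VERDICT (by name: the statement is the Claim_ definition above) =====
theorem pad_grid_and_mask_spec : Claim_equal_pad_grid_and_mask := by
  intro grid pad_size _ hpre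
  obtain ⟨hne, hh, hw, hrag⟩ := hpre
  have hps : 0 ≤ pad_size := le_trans (Int.natCast_nonneg _) hh
  obtain ⟨N, rfl⟩ : ∃ N : Nat, pad_size = (N : Int) := ⟨pad_size.toNat, (Int.toNat_of_nonneg hps).symm⟩
  set w := (grid.headD []).length with hwdef
  set h := grid.length with hhdef
  have hhN : h ≤ N := by exact_mod_cast hh
  have hwN : w ≤ N := by exact_mod_cast hw
  unfold Spec_pad_grid_and_mask
  simp only [pad_grid_and_mask_alt]
  rw [portA_eq]
  simp only [← hwdef, ← hhdef]
  have e1 : ((N : Int) - (w : Int)).toNat = N - w := by omega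
  have e2 : ((N : Int) - (h : Int)).toNat = N - h := by omega
  have e3 : ((N : Int)).toNat = N := by omega
  rw [e1, e2, e3, Prod.mk.injEq]
  constructor
  · -- padded component
    apply List.ext_getElem
    · simp; omega
    · intro k hk hk2
      simp only [List.getElem_map, List.getElem_range] at hk ⊢
      rw [List.length_map, List.length_range] at hk
      by_cases hkh : k < h
      · rw [List.getElem_append_left (by simpa using hkh), List.getElem_map]
        have hc : ∀ (c : Nat), ((k : Int) < (h : Int) ∧ (c : Int) < (w : Int)) ↔ ((c : Int) < (w : Int)) := by
          intro c; constructor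
          · rintro ⟨_, hc⟩; exact hc
          · intro hc; exact ⟨by exact_mod_cast hkh, hc⟩
        calc (List.range N).map (fun (c : Nat) =>
                if (k : Int) < (h : Int) ∧ (c : Int) < (w : Int)
                then PySem.List.pyGetD (PySem.List.pyGetD grid (k : Int) []) (c : Int) 0 else 0)
            = (List.range N).map (fun (c : Nat) =>
                if (c : Int) < (w : Int)
                then PySem.List.pyGetD grid[k] (c : Int) 0 else 0) := by
              apply List.map_congr_left; intro c _
              rw [if_congr (hc c) rfl rfl]
              have : PySem.List.pyGetD grid (k : Int) [] = grid[k] := by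
                rw [PySem.List.pyGetD_natCast, List.getD_eq_getElem _ _ hkh]
              rw [this]
          _ = grid[k].take w ++ List.replicate (N - w) 0 :=
              innerRow_eq (hrag grid[k] (List.getElem_mem hkh)) hwN
      · rw [List.getElem_append_right (by simpa using hkh)]
        simp only [List.length_map]
        rw [List.getElem_replicate]
        have : ∀ (c : Nat), ¬ ((k : Int) < (h : Int) ∧ (c : Int) < (w : Int)) := by
          intro c hcon; exact hkh (by exact_mod_cast hcon.1)
        calc (List.range N).map (fun (c : Nat) =>
                if (k : Int) < (h : Int) ∧ (c : Int) < (w : Int)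
                then PySem.List.pyGetD (PySem.List.pyGetD grid (k : Int) []) (c : Int) 0 else 0)
            = (List.range N).map (fun (_ : Nat) => (0 : Int)) := by
              apply List.map_congr_left; intro c _; rw [if_neg (this c)]
          _ = List.replicate N 0 := by simp [List.map_const']
  · -- mask component
    apply List.ext_getElem
    · simp; omega
    · intro k hk hk2
      rw [List.length_map, List.length_range] at hk
      rw [List.getElem_map, List.getElem_range]
      by_cases hkh : k < h
      · rw [List.getElem_append_left (by simpa using hkh), List.getElem_replicate]
        have hc : ∀ (c : Nat), ((k : Int) < (h : Int) ∧ (c : Int) < (w : Int)) ↔ ((c : Int) < (w : Int)) := by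
          intro c; exact ⟨fun hp => hp.2, fun hc => ⟨by exact_mod_cast hkh, hc⟩⟩
        calc (List.range N).map (fun (c : Nat) =>
                if (k : Int) < (h : Int) ∧ (c : Int) < (w : Int) then (1 : Int) else 0)
            = (List.range N).map (fun (c : Nat) =>
                if (c : Int) < (w : Int) then (1 : Int) else 0) := by
              apply List.map_congr_left; intro c _; rw [if_congr (hc c) rfl rfl]
          _ = List.replicate w 1 ++ List.replicate (N - w) 0 := maskRow_eq hwN
      · rw [List.getElem_append_right (by simpa using hkh)]
        simp only [List.length_replicate]
        rw [List.getElem_replicate]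
        have : ∀ (c : Nat), ¬ ((k : Int) < (h : Int) ∧ (c : Int) < (w : Int)) := by
          intro c hcon; exact hkh (by exact_mod_cast hcon.1)
        calc (List.range N).map (fun (c : Nat) =>
                if (k : Int) < (h : Int) ∧ (c : Int) < (w : Int) then (1 : Int) else 0)
            = (List.range N).map (fun (_ : Nat) => (0 : Int)) := by
              apply List.map_congr_left; intro c _; rw [if_neg (this c)]
          _ = List.replicate N 0 := by simp [List.map_const']
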